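-- pv_equiv track=rewrite | github.com/we260/Mutation-Bias | 3_GC_Skew.py | merge_recombinant_spans
-- ===== SOURCE A (Python) =====
-- def merge_recombinant_spans(suspicious_snvs, window_length, target_contig):
--     all_positions = []
--     for sample in suspicious_snvs:
--         for chrom, pos in suspicious_snvs[sample]:
--             if chrom == target_contig or target_contig in chrom or chrom in target_contig:
--                 all_positions.append(pos)
--     if len(all_positions) == 0:
--         return []
--     all_positions = sorted(set(all_positions))
--     spans = []
--     region_start = all_positions[0]
--     region_end = all_positions[0]
--     for p in all_positions[1:]:
--         if p - region_end <= window_length: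
--             region_end = p
--         else:
--             spans.append((region_start, region_end))
--             region_start = p
--             region_end = p
--     spans.append((region_start, region_end))
--     return spans
-- ===== SOURCE B (Python) =====
-- def merge_recombinant_spans(suspicious_snvs, window_length, target_contig):
--     all_positions = []
--     for sample in suspicious_snvs:
--         for chrom, pos in suspicious_snvs[sample]:
--             if chrom == target_contig or target_contig in chrom or chrom in target_contig:
--                 all_positions.append(pos)
--     positions = sorted(set(all_positions))
--     if not positions:
--         return []
--     # Breakpoint edges: adjacent pairs whose gap exceeds the window. Each such pair
--     # ends one span and starts the next; no running merge state is kept.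
--     gaps = [(a, b) for a, b in zip(positions, positions[1:]) if b - a > window_length]
--     starts = [positions[0]] + [b for _, b in gaps]
--     ends = [a for a, _ in gaps] + [positions[-1]]
--     return list(zip(starts, ends))
-- ===== Notes on version B (the rewrite author's own statement) =====
-- stated objective: alternative
-- what changed: Replaces A's sequential merge with running (region_start, region_end) state by a stateless breakpoint computation: collect the adjacent pairs of the sorted positions whose gap exceeds the window, read span starts and span ends off those pairs, and zip the two lists; no accumulator loop remains.
import Mathlib
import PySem

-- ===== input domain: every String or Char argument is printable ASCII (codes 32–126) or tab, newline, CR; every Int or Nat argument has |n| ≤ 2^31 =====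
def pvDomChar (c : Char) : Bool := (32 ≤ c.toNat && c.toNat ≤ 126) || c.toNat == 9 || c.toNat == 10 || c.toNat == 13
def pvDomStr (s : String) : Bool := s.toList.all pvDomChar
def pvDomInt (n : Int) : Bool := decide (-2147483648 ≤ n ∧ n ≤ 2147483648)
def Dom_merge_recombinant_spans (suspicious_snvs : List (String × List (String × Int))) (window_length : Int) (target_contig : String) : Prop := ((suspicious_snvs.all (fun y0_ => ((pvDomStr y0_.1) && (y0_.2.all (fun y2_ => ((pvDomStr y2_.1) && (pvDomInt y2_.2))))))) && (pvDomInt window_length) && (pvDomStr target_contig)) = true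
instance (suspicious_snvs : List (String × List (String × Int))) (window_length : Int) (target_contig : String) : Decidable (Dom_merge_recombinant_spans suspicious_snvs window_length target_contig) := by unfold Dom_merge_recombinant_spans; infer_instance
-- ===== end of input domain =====

-- B replaces A's sequential merge with running (region_start, region_end) state by a stateless
-- breakpoint computation: the adjacent pairs of the sorted positions whose gap exceeds the window
-- are collected once, span starts and ends are read off them, and the two lists are zipped.
-- Alternative decomposition, same cost.

-- ===== PORT A =====
-- shared collection/filter prefix of both Pythons (identical code in both sources)
def pvCollect (suspicious_snvs : List (String × List (String × Int))) (target_contig : String) : List Int :=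
  (PySem.Dict.ofList suspicious_snvs).items.foldl (fun acc kv =>
    kv.2.foldl (fun acc cp =>
      if cp.1 == target_contig || PySem.Str.isIn target_contig cp.1 || PySem.Str.isIn cp.1 target_contig
      then acc ++ [cp.2] else acc) acc) []

def merge_recombinant_spans (suspicious_snvs : List (String × List (String × Int))) (window_length : Int) (target_contig : String) : List (Int × Int) :=
  let all_positions := pvCollect suspicious_snvs target_contig
  if all_positions.length = 0 then []
  else
    match PySem.List.sorted (PySem.Set.ofList all_positions) (fun x => x) false with
    | [] => []  -- unreachable: all_positions is nonempty, so is its sorted dedup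
    | x :: rest =>
      let st := rest.foldl (fun (st : List (Int × Int) × Int × Int) p =>
        if p - st.2.2 ≤ window_length then (st.1, st.2.1, p)
        else (st.1 ++ [(st.2.1, st.2.2)], p, p)) ([], x, x)
      st.1 ++ [(st.2.1, st.2.2)]

-- ===== PORT B =====
-- Source B: positions[1:] of the (guarded nonempty) list x :: rest is rest; positions[0] is x;
-- positions[-1] is rest.getLastD x; zip truncates to the shorter list as Python's zip does.
def merge_recombinant_spans_alt (suspicious_snvs : List (String × List (String × Int))) (window_length : Int) (target_contig : String) : List (Int × Int) :=
  let all_positions := pvCollect suspicious_snvs target_contig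
  match PySem.List.sorted (PySem.Set.ofList all_positions) (fun x => x) false with
  | [] => []
  | x :: rest =>
    let gaps := ((x :: rest).zip rest).filter (fun ab => decide (window_length < ab.2 - ab.1))
    (x :: gaps.map Prod.snd).zip (gaps.map Prod.fst ++ [rest.getLastD x])

-- ===== PRECONDITION & SPEC =====
def Spec_merge_recombinant_spans (suspicious_snvs : List (String × List (String × Int))) (window_length : Int) (target_contig : String) (out : List (Int × Int)) : Prop := out = merge_recombinant_spans_alt suspicious_snvs window_length target_contig
instance (suspicious_snvs : List (String × List (String × Int))) (window_length : Int) (target_contig : String) (out : List (Int × Int)) : Decidable (Spec_merge_recombinant_spans suspicious_snvs window_length target_contig out) := by unfold Spec_merge_recombinant_spans; infer_instance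

-- ===== CLAIM (what is proved, stated in full; the proofs are below) =====
def Claim_equal_merge_recombinant_spans : Prop := ∀ (suspicious_snvs : List (String × List (String × Int))) (window_length : Int) (target_contig : String), Dom_merge_recombinant_spans suspicious_snvs window_length target_contig → Spec_merge_recombinant_spans suspicious_snvs window_length target_contig (merge_recombinant_spans suspicious_snvs window_length target_contig)

-- ===== LEMMAS AND PROOFS =====

-- A's loop step, named for the proof (definitionally the lambda in the A port)
def pvStepA (window_length : Int) (st : List (Int × Int) × Int × Int) (p : Int) : List (Int × Int) × Int × Int :=
  if p - st.2.2 ≤ window_length then (st.1, st.2.1, p)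
  else (st.1 ++ [(st.2.1, st.2.2)], p, p)

-- recursive characterisation of A's merge loop
def pvSpansRec (w s e : Int) : List Int → List (Int × Int)
  | [] => [(s, e)]
  | p :: ps => if p - e ≤ w then pvSpansRec w s p ps else (s, e) :: pvSpansRec w p p ps

lemma pv_foldl_eq (w : Int) : ∀ (ps : List Int) (acc : List (Int × Int)) (s e : Int),
    (ps.foldl (pvStepA w) (acc, s, e)).1
      ++ [((ps.foldl (pvStepA w) (acc, s, e)).2.1, (ps.foldl (pvStepA w) (acc, s, e)).2.2)]
    = acc ++ pvSpansRec w s e ps := by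
  intro ps
  induction ps with
  | nil => intro acc s e; simp [pvSpansRec]
  | cons p ps ih =>
    intro acc s e
    simp only [List.foldl_cons, pvStepA, pvSpansRec]
    by_cases hc : p - e ≤ w
    · simp only [hc, if_pos]
      exact ih acc s p
    · simp only [hc, if_neg, not_false_iff]
      rw [ih (acc ++ [(s, e)]) p p]
      simp

lemma pv_rec_zip (w : Int) : ∀ (ps : List Int) (s e : Int),
    pvSpansRec w s e ps
      = (s :: (((e :: ps).zip ps).filter (fun ab => decide (w < ab.2 - ab.1))).map Prod.snd).zip
        ((((e :: ps).zip ps).filter (fun ab => decide (w < ab.2 - ab.1))).map Prod.fst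
          ++ [ps.getLastD e]) := by
  intro ps
  induction ps with
  | nil => intro s e; simp [pvSpansRec]
  | cons p ps ih =>
    intro s e
    simp only [pvSpansRec, List.zip_cons_cons, List.filter_cons]
    by_cases hc : p - e ≤ w
    · have h1 : ¬ (w < p - e) := by omega
      simp only [decide_eq_true_eq, h1, if_neg, not_false_iff]
      rw [if_pos hc, ih s p]
      cases ps with
      | nil => simp
      | cons h t => simp only [List.getLastD_cons]
    · have h1 : w < p - e := by omega
      simp only [h1, decide_true, if_true]
      rw [if_neg hc, ih p p]
      simp only [List.map_cons, List.zip_cons_cons, List.cons_append]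
      cases ps with
      | nil => simp
      | cons h t => simp only [List.getLastD_cons]

-- ===== VERDICT (by name: the statement is the Claim_ definition above) =====
theorem merge_recombinant_spans_spec : Claim_equal_merge_recombinant_spans := by
  intro snvs w tc _
  unfold Spec_merge_recombinant_spans merge_recombinant_spans merge_recombinant_spans_alt
  by_cases h : (pvCollect snvs tc).length = 0
  · have h0 : pvCollect snvs tc = [] := List.length_eq_zero_iff.mp h
    simp [h0, PySem.Set.ofList, PySem.List.sorted]
  · simp only [h, if_false]
    cases hs : PySem.List.sorted (PySem.Set.ofList (pvCollect snvs tc)) (fun x => x) false with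
    | nil => rfl
    | cons x rest =>
      have := pv_foldl_eq w rest [] x x
      simp only [List.nil_append] at this
      show (rest.foldl (pvStepA w) ([], x, x)).1
          ++ [((rest.foldl (pvStepA w) ([], x, x)).2.1, (rest.foldl (pvStepA w) ([], x, x)).2.2)]
        = _
      rw [this, pv_rec_zip w rest x x]
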